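-- pv_equiv track=rewrite | github.com/AnirudhGoel/CompetitiveProgramming | The Maximum Subarray.py | check_negative
-- ===== SOURCE A (Python) =====
-- def check_negative(A):
-- 	n = 0
-- 	for i in range(0,len(A)):
-- 		if A[i] <= 0:
-- 			n += 1
-- 	if n == len(A):
-- 		return max(A)
-- 	else:
-- 		return 1
-- ===== SOURCE B (Python) =====
-- def check_negative(A):
--     m = max(A)
--     return m if m <= 0 else 1
-- ===== Notes on version B (the rewrite author's own statement) =====
-- stated objective: simpler
-- what changed: Replaces the index loop that counts non-positive elements (compared against len(A)) with a single max(A) computation: m <= 0 iff all elements are non-positive, so B returns m if m <= 0 else 1.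
-- outside the precondition, e.g. on check_negative([]): A raises ValueError, B raises ValueError
import Mathlib
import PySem

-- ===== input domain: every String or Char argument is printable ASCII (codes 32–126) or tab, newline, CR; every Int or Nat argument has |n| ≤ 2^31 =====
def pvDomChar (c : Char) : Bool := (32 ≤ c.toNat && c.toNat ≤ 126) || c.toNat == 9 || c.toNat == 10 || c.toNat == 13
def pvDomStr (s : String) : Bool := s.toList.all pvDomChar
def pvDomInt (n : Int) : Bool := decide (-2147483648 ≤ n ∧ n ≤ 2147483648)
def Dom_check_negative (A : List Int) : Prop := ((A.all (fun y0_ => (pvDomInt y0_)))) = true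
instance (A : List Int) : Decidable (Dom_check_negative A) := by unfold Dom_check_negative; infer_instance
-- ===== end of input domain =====

-- B replaces A's counting loop by a single max(A) computation (simpler decomposition, same cost).

-- ===== PORT A =====
def check_negative (A : List Int) : Int :=
  let n : Int := (PySem.List.pyRange 0 (A.length : Int) 1).foldl
    (fun n i => if PySem.List.pyGetD A i 0 ≤ 0 then n + 1 else n) 0
  if n = (A.length : Int) then (PySem.List.max? A (fun y => y)).getD 0 else 1

-- ===== PORT B =====
def check_negative_alt (A : List Int) : Int :=
  match PySem.List.max? A (fun y => y) with
  | some m => if m ≤ 0 then m else 1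
  | none => 0

-- ===== PRECONDITION & SPEC =====
-- A raises ValueError on [] (max of empty sequence); B raises there too.
def Pre_check_negative (A : List Int) : Prop := A ≠ []
instance (A : List Int) : Decidable (Pre_check_negative A) := by unfold Pre_check_negative; infer_instance
def pvWitness_check_negative : List Int := [-3, 2, 0]

def Spec_check_negative (A : List Int) (out : Int) : Prop := out = check_negative_alt A
instance (A : List Int) (out : Int) : Decidable (Spec_check_negative A out) := by unfold Spec_check_negative; infer_instance

-- ===== CLAIM (what is proved, stated in full; the proofs are below) =====
def Claim_equal_check_negative : Prop := ∀ (A : List Int), Dom_check_negative A → Pre_check_negative A → Spec_check_negative A (check_negative A)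

-- ===== LEMMAS AND PROOFS =====

theorem pv_count_add (t : List Int) (c : Int) :
    t.foldl (fun n x => if x ≤ 0 then n + 1 else n) c
      = c + t.foldl (fun n x => if x ≤ 0 then n + 1 else n) 0 := by
  induction t generalizing c with
  | nil => simp
  | cons x t ih =>
    simp only [List.foldl_cons]
    rw [ih, ih (if x ≤ 0 then (0:Int) + 1 else 0)]
    split_ifs <;> ring

theorem pv_count_eq_len_iff (t : List Int) :
    (t.foldl (fun n x => if x ≤ 0 then n + 1 else n) 0 = (t.length : Int))
      ↔ ∀ x ∈ t, x ≤ 0 := by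
  induction t with
  | nil => simp
  | cons x t ih =>
    simp only [List.foldl_cons, List.length_cons, List.mem_cons]
    rw [pv_count_add]
    have hle : t.foldl (fun n x => if x ≤ 0 then n + 1 else n) 0 ≤ (t.length : Int) := by
      clear ih
      induction t with
      | nil => simp
      | cons y t ih2 =>
        simp only [List.foldl_cons, List.length_cons]
        rw [pv_count_add]
        split_ifs <;> push_cast <;> omega
    constructor
    · intro h
      split_ifs at h with hx
      · have := ih.mp (by push_cast at h ⊢; omega)
        exact fun y hy => hy.elim (fun e => e ▸ hx) (this y)
      · exfalso; push_cast at h; omega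
    · intro h
      have hx : x ≤ 0 := h x (Or.inl rfl)
      rw [if_pos hx, ih.mpr (fun y hy => h y (Or.inr hy))]
      push_cast; ring

theorem pv_foldl_max_nonpos (t : List Int) (a : Int) :
    t.foldl max a ≤ 0 ↔ (a ≤ 0 ∧ ∀ x ∈ t, x ≤ 0) := by
  constructor
  · intro h
    obtain ⟨h1, h2⟩ := PySem.List.le_foldl_max t a
    exact ⟨le_trans h1 h, fun x hx => le_trans (h2 x hx) h⟩
  · rintro ⟨ha, hall⟩
    rcases PySem.List.foldl_max_mem t a with h | h
    · omega
    · exact hall _ h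

-- ===== VERDICT (by name: the statement is the Claim_ definition above) =====
theorem check_negative_spec : Claim_equal_check_negative := by
  intro A _ hpre
  unfold Spec_check_negative check_negative check_negative_alt
  obtain ⟨x, t, rfl⟩ : ∃ x t, A = x :: t := by
    cases A with
    | nil => exact absurd rfl hpre
    | cons x t => exact ⟨x, t, rfl⟩
  rw [PySem.List.foldl_pyRange_zero_pyGetD' (x :: t) 0
    (fun n y => if y ≤ 0 then n + 1 else n) 0]
  rw [PySem.List.max?_id_cons]
  simp only [Option.getD_some]
  by_cases h : t.foldl max x ≤ 0
  · rw [if_pos h]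
    have := (pv_foldl_max_nonpos t x).mp h
    rw [if_pos ((pv_count_eq_len_iff (x :: t)).mpr (by
      intro y hy; rcases List.mem_cons.mp hy with e | e
      · exact e ▸ this.1
      · exact this.2 y e))]
  · rw [if_neg h]
    rw [if_neg (by
      intro hc
      have hall := (pv_count_eq_len_iff (x :: t)).mp hc
      exact h ((pv_foldl_max_nonpos t x).mpr
        ⟨hall x (List.mem_cons_self), fun y hy => hall y (List.mem_cons_of_mem _ hy)⟩))]
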